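-- pv_equiv track=rewrite | github.com/marsdev26/python_exercices | testW.py | check_wxyz
-- ===== SOURCE A (Python) =====
-- def word_in_list(word, word_list, results):
--     if word in word_list:
--         if word not in results:
--             results[word] = 1
--             return True
--         else:
--             results[word] += 1
--             return True
--     else:
--         return False
--
-- def check_wxyz(wordlist, matrix):
--     temp_result1 = {}
--     temp_result2 = {}
--     my_list = []
--     for i in range(len(matrix)):
--         for j1 in range(min(i + 1, len(matrix[0]))):
--             for j2 in range(j1, min(i + 1, len(matrix[0]))):
--                 s = []
--                 for j in range(j1, j2 + 1):
--                     s.append(matrix[i - j][j])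
--                 my_list.append(''.join(s))
--
--     for testword in my_list:
--         if word_in_list(testword, wordlist, temp_result1):
--             continue
--
--     my_list2 = []
--     for j in range(1, len(matrix[0])):
--         for i1 in range(0, len(matrix[0]) - j):
--             for i2 in range(i1 + 1, len(matrix[0]) - j + 1):
--                 k = []
--                 for i in range(i1, i2):
--                     k.append(matrix[len(matrix) - i - 1][j + i])
--                 my_list2.append(''.join(k))
--     for word in my_list2:
--         if word_in_list(word, wordlist, temp_result2):
--             continue
--
--     results = sum_result(temp_result1, temp_result2)
--     return results
--
-- def sum_result(dict1, dict2):
--     result = {}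
--     for key, val in dict1.items():
--         for k, l in dict2.items():
--             if key == k:
--                 c = {key: val + l}
--                 result.update(c)
--     for key, val in dict1.items():
--         if key not in result:
--             result.update({key: val})
--     for m, n in dict2.items():
--         if m not in result:
--             result.update({m: n})
--
--     return result
-- ===== SOURCE B (Python) =====
-- # B: build each "/" diagonal string once, scan only windows no longer than the
-- # longest word (set lookup, counter dict), then merge the two count dicts linearly.
-- def check_wxyz(wordlist, matrix):
--     H = len(matrix)
--     W = len(matrix[0])
--     words = set(wordlist)
--     K = max((len(w) for w in words), default=0)
--
--     diags1 = []
--     for i in range(H):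
--         diags1.append(''.join(matrix[i - j][j] for j in range(min(i + 1, W))))
--     diags2 = []
--     for j in range(1, W):
--         diags2.append(''.join(matrix[H - i - 1][j + i] for i in range(W - j)))
--
--     def tally(diags):
--         counts = {}
--         for d in diags:
--             n = len(d)
--             for a in range(n):
--                 for l in range(1, min(K, n - a) + 1):
--                     w = d[a:a + l]
--                     if w in words:
--                         counts[w] = counts.get(w, 0) + 1
--         return counts
--
--     c1 = tally(diags1)
--     c2 = tally(diags2)
--     out = {w: v + c2[w] for w, v in c1.items() if w in c2}
--     for w, v in c1.items():
--         if w not in out: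
--             out[w] = v
--     for w, v in c2.items():
--         if w not in c1:
--             out[w] = v
--     return out
-- ===== Notes on version B (the rewrite author's own statement) =====
-- stated objective: faster
-- what changed: B builds each '/'-diagonal string once and scans only windows up to the longest word's length against a set with a counter dict, instead of A's materialising every substring of every diagonal (re-reading matrix cells per substring) and counting via list-scan lookups and an insert/increment dict protocol; the two count dicts are merged in one linear pass each instead of A's quadratic double loop.
import Mathlib
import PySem

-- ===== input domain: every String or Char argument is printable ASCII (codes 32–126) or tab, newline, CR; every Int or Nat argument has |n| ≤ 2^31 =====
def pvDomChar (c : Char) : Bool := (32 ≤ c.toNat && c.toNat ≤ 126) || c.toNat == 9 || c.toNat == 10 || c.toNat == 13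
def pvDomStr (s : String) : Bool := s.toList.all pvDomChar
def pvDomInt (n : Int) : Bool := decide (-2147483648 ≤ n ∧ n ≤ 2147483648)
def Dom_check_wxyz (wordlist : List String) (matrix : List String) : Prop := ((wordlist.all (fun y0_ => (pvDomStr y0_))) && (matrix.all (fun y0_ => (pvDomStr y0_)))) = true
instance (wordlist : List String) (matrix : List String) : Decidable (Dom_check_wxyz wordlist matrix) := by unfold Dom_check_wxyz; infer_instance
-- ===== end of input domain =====

-- B replaces A's enumeration of every diagonal substring (with list-scan lookups,
-- a dict protocol and a quadratic merge) by: each diagonal string built once, only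
-- windows up to the longest word's length checked against a set, counts kept in a
-- counter dict, and a linear merge of the two count dicts.  (objective: faster)

-- ===== PORT A =====
def word_in_list (word : String) (word_list : List String) (results : PySem.Dict String Int) :
    Bool × PySem.Dict String Int :=
  if word_list.contains word then
    if results.contains word = false then (true, results.insert word 1)
    else (true, results.insert word (results.getD word 0 + 1))
  else (false, results)

def sum_result (dict1 dict2 : PySem.Dict String Int) : PySem.Dict String Int :=
  let result := dict1.items.foldl (fun result kv =>
    dict2.items.foldl (fun result kl =>
      if kv.1 == kl.1 then result.insert kv.1 (kv.2 + kl.2) else result) result) PySem.Dict.empty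
  let result := dict1.items.foldl (fun result kv =>
    if result.contains kv.1 then result else result.insert kv.1 kv.2) result
  dict2.items.foldl (fun result kv =>
    if result.contains kv.1 then result else result.insert kv.1 kv.2) result

-- matrix[i-j][j] / matrix[len(matrix)-i-1][j+i]: under Pre_ every index is in range,
-- so the .getD defaults are never reached (outside Pre_ the Python raises IndexError).
def check_wxyz (wordlist : List String) (matrix : List String) : List (String × Int) :=
  let myList : List String :=
    (PySem.List.pyRange 0 (PySem.List.len matrix)).foldl (fun acc i =>
      (PySem.List.pyRange 0 (min (i + 1) (PySem.Str.len ((PySem.List.pyGet? matrix 0).getD "")))).foldl (fun acc j1 =>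
        (PySem.List.pyRange j1 (min (i + 1) (PySem.Str.len ((PySem.List.pyGet? matrix 0).getD "")))).foldl (fun acc j2 =>
          acc ++ [String.ofList ((PySem.List.pyRange j1 (j2 + 1)).foldl (fun s j =>
            s ++ [(PySem.Str.pyGet? ((PySem.List.pyGet? matrix (i - j)).getD "") j).getD ' ']) [])]) acc) acc) []
  let temp1 := myList.foldl (fun d w => (word_in_list w wordlist d).2) PySem.Dict.empty
  let myList2 : List String :=
    (PySem.List.pyRange 1 (PySem.Str.len ((PySem.List.pyGet? matrix 0).getD ""))).foldl (fun acc j =>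
      (PySem.List.pyRange 0 (PySem.Str.len ((PySem.List.pyGet? matrix 0).getD "") - j)).foldl (fun acc i1 =>
        (PySem.List.pyRange (i1 + 1) (PySem.Str.len ((PySem.List.pyGet? matrix 0).getD "") - j + 1)).foldl (fun acc i2 =>
          acc ++ [String.ofList ((PySem.List.pyRange i1 i2).foldl (fun k i =>
            k ++ [(PySem.Str.pyGet? ((PySem.List.pyGet? matrix (PySem.List.len matrix - i - 1)).getD "") (j + i)).getD ' ']) [])]) acc) acc) []
  let temp2 := myList2.foldl (fun d w => (word_in_list w wordlist d).2) PySem.Dict.empty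
  (sum_result temp1 temp2).items

-- ===== PORT B =====
def pvTally (words : PySem.Set String) (K : Int) (diags : List String) : PySem.Dict String Int :=
  diags.foldl (fun counts d =>
    let n := PySem.Str.len d
    (PySem.List.pyRange 0 n).foldl (fun counts a =>
      (PySem.List.pyRange 1 (min K (n - a) + 1)).foldl (fun counts l =>
        let w := PySem.Str.slice d (some a) (some (a + l))
        if words.contains w then counts.insert w (counts.getD w 0 + 1) else counts) counts) counts)
    PySem.Dict.empty

def check_wxyz_alt (wordlist : List String) (matrix : List String) : List (String × Int) :=
  let H := PySem.List.len matrix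
  let W := PySem.Str.len ((PySem.List.pyGet? matrix 0).getD "")
  let words := PySem.Set.ofList wordlist
  let K := PySem.List.maxD (words.map (fun w => PySem.Str.len w)) (fun x => x) 0
  let diags1 := (PySem.List.pyRange 0 H).foldl (fun acc i =>
    acc ++ [String.ofList ((PySem.List.pyRange 0 (min (i + 1) W)).map (fun j =>
      (PySem.Str.pyGet? ((PySem.List.pyGet? matrix (i - j)).getD "") j).getD ' '))]) []
  let diags2 := (PySem.List.pyRange 1 W).foldl (fun acc j =>
    acc ++ [String.ofList ((PySem.List.pyRange 0 (W - j)).map (fun i =>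
      (PySem.Str.pyGet? ((PySem.List.pyGet? matrix (H - i - 1)).getD "") (j + i)).getD ' '))]) []
  let c1 := pvTally words K diags1
  let c2 := pvTally words K diags2
  let out := c1.items.foldl (fun out wv =>
    if c2.contains wv.1 then out.insert wv.1 (wv.2 + c2.getD wv.1 0) else out) PySem.Dict.empty
  let out := c1.items.foldl (fun out wv =>
    if out.contains wv.1 then out else out.insert wv.1 wv.2) out
  let out := c2.items.foldl (fun out wv =>
    if c1.contains wv.1 then out else out.insert wv.1 wv.2) out
  out.items

-- ===== PRECONDITION & SPEC =====
-- Pre_ excludes exactly the inputs on which the Python A raises IndexError: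
-- an empty matrix (len(matrix[0])), a row shorter than the first row (cell access),
-- and a first row longer than 2*len(matrix)+1 (matrix[len(matrix)-i-1] below -len(matrix)).
def Pre_check_wxyz (wordlist : List String) (matrix : List String) : Prop :=
  matrix ≠ [] ∧ (∀ r ∈ matrix, (matrix.headD "").toList.length ≤ r.toList.length) ∧
    (matrix.headD "").toList.length ≤ 2 * matrix.length + 1
instance (wordlist : List String) (matrix : List String) : Decidable (Pre_check_wxyz wordlist matrix) := by
  unfold Pre_check_wxyz; infer_instance

def pvWitness_check_wxyz : List String × List String := (["ab", "b"], ["ab", "ba"])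

def Spec_check_wxyz (wordlist : List String) (matrix : List String) (out : List (String × Int)) : Prop := out = check_wxyz_alt wordlist matrix
instance (wordlist : List String) (matrix : List String) (out : List (String × Int)) : Decidable (Spec_check_wxyz wordlist matrix out) := by unfold Spec_check_wxyz; infer_instance

-- ===== CLAIM (what is proved, stated in full; the proofs are below) =====
def Claim_equal_check_wxyz : Prop := ∀ (wordlist : List String) (matrix : List String), Dom_check_wxyz wordlist matrix → Pre_check_wxyz wordlist matrix → Spec_check_wxyz wordlist matrix (check_wxyz wordlist matrix)


-- ===== LEMMAS AND PROOFS =====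

-- the common counting step: on a word in the list, insert-or-increment; otherwise skip
def pvStep (wl : List String) (d : PySem.Dict String Int) (w : String) : PySem.Dict String Int :=
  if (PySem.Set.ofList wl).contains w then d.insert w (d.getD w 0 + 1) else d

theorem pvSetContains (wl : List String) (w : String) :
    (PySem.Set.ofList wl).contains w = wl.contains w := by
  by_cases h : w ∈ wl
  · simp [PySem.Set.mem_ofList, h]
  · have h2 : ¬ w ∈ PySem.Set.ofList wl := by simp [PySem.Set.mem_ofList, h]
    simp [h, h2]

theorem pvStepA_eq (wl : List String) (d : PySem.Dict String Int) (w : String) :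
    (word_in_list w wl d).2 = pvStep wl d w := by
  unfold word_in_list pvStep
  rw [pvSetContains]
  by_cases hm : w ∈ wl
  · by_cases h2 : d.contains w
    · simp [hm, h2]
    · have h2' : d.contains w = false := by simpa using h2
      simp [hm, h2', PySem.Dict.getD_of_not_contains d 0 h2']
  · simp [hm]

theorem pvLenOfList (L : List Char) : PySem.Str.len (String.ofList L) = (L.length : Int) := by
  simp [PySem.Str.len_eq]

theorem pvStrSlice (L : List Char) (a? b? : Option Int) :
    PySem.Str.slice (String.ofList L) a? b? = String.ofList (PySem.List.slice L a? b?) := by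
  simp [PySem.Str.slice, PySem.Chars.slice_eq_listSlice]

theorem pvSliceMap (f : Int → Char) (n : Int) (a k : Nat) (h : (a : Int) + ((k : Int) + 1) ≤ n) :
    PySem.List.slice ((PySem.List.pyRange 0 n).map f) (some (a : Int)) (some ((a : Int) + (1 + (k : Int))))
      = (PySem.List.pyRange (a : Int) ((a : Int) + (k : Int) + 1)).map f := by
  have hb : ((a : Int) + (1 + (k : Int))) = ((a + (1 + k) : Nat) : Int) := by push_cast; ring
  rw [hb, PySem.List.slice_natCast]
  apply List.ext_getElem
  · simp [PySem.List.pyRange_one, List.length_take, List.length_drop]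
    omega
  · intro i h1 h2
    simp [List.getElem_take, List.getElem_drop, List.getElem_map, PySem.List.pyRange_one]

theorem pvWordLen (f : Int → Char) (a b : Int) (hab : a ≤ b) :
    PySem.Str.len (String.ofList ((PySem.List.pyRange a b).map f)) = b - a := by
  rw [pvLenOfList]
  simp [PySem.List.length_pyRange_one]
  omega

theorem pvNotWord (wl : List String) (K : Int)
    (hK : ∀ w ∈ PySem.Set.ofList wl, PySem.Str.len w ≤ K) (w : String)
    (hw : K < PySem.Str.len w) : ((PySem.Set.ofList wl).contains w) = false := by
  by_contra h
  have hmem : w ∈ PySem.Set.ofList wl := (PySem.Set.contains_iff _ _).mp (by simpa using h)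
  exact absurd (hK w hmem) (by omega)

-- A scans every window length, B stops at K; longer windows are never words, so the tails are no-ops
theorem pvInner (wl : List String) (K : Int)
    (hK : ∀ w ∈ PySem.Set.ofList wl, PySem.Str.len w ≤ K) (hK0 : 0 ≤ K)
    (f : Int → Char) (n a : Int) (h0 : 0 ≤ a) (han : a < n) (d0 : PySem.Dict String Int) :
    (List.range (n - a).toNat).foldl
        (fun d (k : Nat) => pvStep wl d (String.ofList ((PySem.List.pyRange a (a + (k : Int) + 1)).map f))) d0
      = (List.range (min K (n - a)).toNat).foldl
        (fun d (k : Nat) => pvStep wl d (PySem.Str.slice (String.ofList ((PySem.List.pyRange 0 n).map f))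
          (some a) (some (a + (1 + (k : Int)))))) d0 := by
  have hMN : (min K (n - a)).toNat ≤ (n - a).toNat := by omega
  rw [show (n - a).toNat = (min K (n - a)).toNat + ((n - a).toNat - (min K (n - a)).toNat) by omega,
    List.range_add, List.foldl_append]
  have hsuf : ∀ dacc : PySem.Dict String Int,
      ((List.range ((n - a).toNat - (min K (n - a)).toNat)).map (fun x => (min K (n - a)).toNat + x)).foldl
        (fun d (k : Nat) => pvStep wl d (String.ofList ((PySem.List.pyRange a (a + (k : Int) + 1)).map f))) dacc = dacc := by
    intro dacc
    rw [List.foldl_map]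
    rw [PySem.List.foldl_congr_mem _ _ (fun acc _ => acc) _ ?_, PySem.List.foldl_ignore]
    intro acc x hx
    have hxlt : x < (n - a).toNat - (min K (n - a)).toNat := List.mem_range.mp hx
    have hlen : PySem.Str.len (String.ofList ((PySem.List.pyRange a (a + ((((min K (n - a)).toNat + x) : Nat) : Int) + 1)).map f))
        = a + ((((min K (n - a)).toNat + x) : Nat) : Int) + 1 - a := by
      apply pvWordLen
      push_cast
      omega
    have hnm : ((PySem.Set.ofList wl).contains (String.ofList ((PySem.List.pyRange a (a + ((((min K (n - a)).toNat + x) : Nat) : Int) + 1)).map f))) = false := by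
      apply pvNotWord wl K hK
      rw [hlen]
      omega
    unfold pvStep
    rw [hnm]
    simp
  rw [hsuf]
  apply PySem.List.foldl_congr_mem
  intro acc k hk
  have hkM : k < (min K (n - a)).toNat := List.mem_range.mp hk
  have ha' : a = ((a.toNat : Nat) : Int) := by omega
  rw [ha', pvStrSlice, pvSliceMap f n a.toNat k (by omega)]

-- one family-1 diagonal: A's (j1, j2) substring loops = B's bounded-window scan of the diagonal string
theorem pvMid1 (wl : List String) (K : Int)
    (hK : ∀ w ∈ PySem.Set.ofList wl, PySem.Str.len w ≤ K) (hK0 : 0 ≤ K)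
    (f : Int → Char) (n : Int) (hn : 0 ≤ n) (d0 : PySem.Dict String Int) :
    (PySem.List.pyRange 0 n).foldl (fun d j1 =>
        (PySem.List.pyRange j1 n).foldl (fun d j2 =>
          pvStep wl d (String.ofList ((PySem.List.pyRange j1 (j2 + 1)).map f))) d) d0
      = (PySem.List.pyRange 0 (PySem.Str.len (String.ofList ((PySem.List.pyRange 0 n).map f)))).foldl (fun d a =>
          (PySem.List.pyRange 1 (min K (PySem.Str.len (String.ofList ((PySem.List.pyRange 0 n).map f)) - a) + 1)).foldl (fun d l =>
            pvStep wl d (PySem.Str.slice (String.ofList ((PySem.List.pyRange 0 n).map f)) (some a) (some (a + l)))) d) d0 := by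
  have hlen : PySem.Str.len (String.ofList ((PySem.List.pyRange 0 n).map f)) = n := by
    rw [pvLenOfList]
    simp [PySem.List.length_pyRange_one]
    omega
  rw [hlen]
  apply PySem.List.foldl_congr_mem
  intro acc a ha
  obtain ⟨ha0, han⟩ := PySem.List.mem_pyRange_one.mp ha
  rw [PySem.List.pyRange_one a n, List.foldl_map]
  rw [PySem.List.pyRange_one 1 (min K (n - a) + 1), List.foldl_map]
  have h1 : min K (n - a) + 1 - 1 = min K (n - a) := by ring
  rw [h1]
  exact pvInner wl K hK hK0 f n a ha0 han acc

-- one family-2 diagonal, same statement with the (i1, i2) index convention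
theorem pvMid2 (wl : List String) (K : Int)
    (hK : ∀ w ∈ PySem.Set.ofList wl, PySem.Str.len w ≤ K) (hK0 : 0 ≤ K)
    (f : Int → Char) (m : Int) (hm : 0 ≤ m) (d0 : PySem.Dict String Int) :
    (PySem.List.pyRange 0 m).foldl (fun d i1 =>
        (PySem.List.pyRange (i1 + 1) (m + 1)).foldl (fun d i2 =>
          pvStep wl d (String.ofList ((PySem.List.pyRange i1 i2).map f))) d) d0
      = (PySem.List.pyRange 0 (PySem.Str.len (String.ofList ((PySem.List.pyRange 0 m).map f)))).foldl (fun d a =>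
          (PySem.List.pyRange 1 (min K (PySem.Str.len (String.ofList ((PySem.List.pyRange 0 m).map f)) - a) + 1)).foldl (fun d l =>
            pvStep wl d (PySem.Str.slice (String.ofList ((PySem.List.pyRange 0 m).map f)) (some a) (some (a + l)))) d) d0 := by
  have hlen : PySem.Str.len (String.ofList ((PySem.List.pyRange 0 m).map f)) = m := by
    rw [pvLenOfList]
    simp [PySem.List.length_pyRange_one]
    omega
  rw [hlen]
  apply PySem.List.foldl_congr_mem
  intro acc a ha
  obtain ⟨ha0, ham⟩ := PySem.List.mem_pyRange_one.mp ha
  rw [PySem.List.pyRange_one (a + 1) (m + 1), List.foldl_map]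
  have h2 : m + 1 - (a + 1) = m - a := by ring
  rw [h2]
  rw [PySem.List.foldl_congr_mem _ _
    (fun d (k : Nat) => pvStep wl d (String.ofList ((PySem.List.pyRange a (a + (k : Int) + 1)).map f))) _ ?_]
  · rw [PySem.List.pyRange_one 1 (min K (m - a) + 1), List.foldl_map]
    have h1 : min K (m - a) + 1 - 1 = min K (m - a) := by ring
    rw [h1]
    exact pvInner wl K hK hK0 f m a ha0 ham acc
  · intro acc' x hx
    have h3 : a + 1 + (x : Int) = a + (x : Int) + 1 := by ring
    simp only [h3]

theorem pvK_spec (wl : List String) :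
    (∀ w ∈ PySem.Set.ofList wl, PySem.Str.len w ≤
        PySem.List.maxD ((PySem.Set.ofList wl).map (fun w => PySem.Str.len w)) (fun x => x) 0)
      ∧ 0 ≤ PySem.List.maxD ((PySem.Set.ofList wl).map (fun w => PySem.Str.len w)) (fun x => x) 0 := by
  by_cases h : PySem.Set.ofList wl = []
  · constructor
    · intro w hw; rw [h] at hw; cases hw
    · rw [h]; simp [PySem.List.maxD_nil]
  · have hne : ((PySem.Set.ofList wl).map (fun w => PySem.Str.len w)) ≠ [] := by
      simpa using h
    constructor
    · intro w hw
      have hle := PySem.List.le_key_maxD ((PySem.Set.ofList wl).map (fun w => PySem.Str.len w))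
        (fun x => x) 0 hne (PySem.Str.len w) (List.mem_map_of_mem hw)
      simpa using hle
    · have hmem := PySem.List.maxD_mem ((PySem.Set.ofList wl).map (fun w => PySem.Str.len w))
        (fun x => x) 0 hne
      obtain ⟨w, _, hw⟩ := List.mem_map.mp hmem
      rw [← hw, PySem.Str.len_eq]
      positivity

-- the whole family-1 pass: A's substring dict = B's first tally
theorem pvTop1 (wl mx : List String) :
    ((PySem.List.pyRange 0 (PySem.List.len mx)).foldl (fun acc i =>
      (PySem.List.pyRange 0 (min (i + 1) (PySem.Str.len ((PySem.List.pyGet? mx 0).getD "")))).foldl (fun acc j1 =>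
        (PySem.List.pyRange j1 (min (i + 1) (PySem.Str.len ((PySem.List.pyGet? mx 0).getD "")))).foldl (fun acc j2 =>
          acc ++ [String.ofList ((PySem.List.pyRange j1 (j2 + 1)).foldl (fun s j =>
            s ++ [(PySem.Str.pyGet? ((PySem.List.pyGet? mx (i - j)).getD "") j).getD ' ']) [])]) acc) acc) []).foldl
      (fun d w => (word_in_list w wl d).2) PySem.Dict.empty
    = pvTally (PySem.Set.ofList wl)
        (PySem.List.maxD ((PySem.Set.ofList wl).map (fun w => PySem.Str.len w)) (fun x => x) 0)
        ((PySem.List.pyRange 0 (PySem.List.len mx)).foldl (fun acc i =>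
          acc ++ [String.ofList ((PySem.List.pyRange 0 (min (i + 1) (PySem.Str.len ((PySem.List.pyGet? mx 0).getD "")))).map (fun j =>
            (PySem.Str.pyGet? ((PySem.List.pyGet? mx (i - j)).getD "") j).getD ' '))]) []) := by
  unfold pvTally
  simp only [PySem.List.foldl_append_singleton_eq_map, PySem.List.foldl_append_eq_flatMap,
    List.nil_append, List.foldl_flatMap, List.foldl_map, pvStepA_eq]
  apply PySem.List.foldl_congr_mem
  intro acc i hi
  have hW : (0:Int) ≤ PySem.Str.len ((PySem.List.pyGet? mx 0).getD "") := by
    rw [PySem.Str.len_eq]; positivity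
  have hi0 : 0 ≤ i := (PySem.List.mem_pyRange_one.mp hi).1
  exact pvMid1 wl _ (pvK_spec wl).1 (pvK_spec wl).2
    (fun j => (PySem.Str.pyGet? ((PySem.List.pyGet? mx (i - j)).getD "") j).getD ' ')
    (min (i + 1) (PySem.Str.len ((PySem.List.pyGet? mx 0).getD ""))) (by omega) acc

-- the whole family-2 pass
theorem pvTop2 (wl mx : List String) :
    ((PySem.List.pyRange 1 (PySem.Str.len ((PySem.List.pyGet? mx 0).getD ""))).foldl (fun acc j =>
      (PySem.List.pyRange 0 (PySem.Str.len ((PySem.List.pyGet? mx 0).getD "") - j)).foldl (fun acc i1 =>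
        (PySem.List.pyRange (i1 + 1) (PySem.Str.len ((PySem.List.pyGet? mx 0).getD "") - j + 1)).foldl (fun acc i2 =>
          acc ++ [String.ofList ((PySem.List.pyRange i1 i2).foldl (fun k i =>
            k ++ [(PySem.Str.pyGet? ((PySem.List.pyGet? mx (PySem.List.len mx - i - 1)).getD "") (j + i)).getD ' ']) [])]) acc) acc) []).foldl
      (fun d w => (word_in_list w wl d).2) PySem.Dict.empty
    = pvTally (PySem.Set.ofList wl)
        (PySem.List.maxD ((PySem.Set.ofList wl).map (fun w => PySem.Str.len w)) (fun x => x) 0)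
        ((PySem.List.pyRange 1 (PySem.Str.len ((PySem.List.pyGet? mx 0).getD ""))).foldl (fun acc j =>
          acc ++ [String.ofList ((PySem.List.pyRange 0 (PySem.Str.len ((PySem.List.pyGet? mx 0).getD "") - j)).map (fun i =>
            (PySem.Str.pyGet? ((PySem.List.pyGet? mx (PySem.List.len mx - i - 1)).getD "") (j + i)).getD ' '))]) []) := by
  unfold pvTally
  simp only [PySem.List.foldl_append_singleton_eq_map, PySem.List.foldl_append_eq_flatMap,
    List.nil_append, List.foldl_flatMap, List.foldl_map, pvStepA_eq]
  apply PySem.List.foldl_congr_mem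
  intro acc j hj
  obtain ⟨hj1, hjW⟩ := PySem.List.mem_pyRange_one.mp hj
  exact pvMid2 wl _ (pvK_spec wl).1 (pvK_spec wl).2
    (fun i => (PySem.Str.pyGet? ((PySem.List.pyGet? mx (PySem.List.len mx - i - 1)).getD "") (j + i)).getD ' ')
    (PySem.Str.len ((PySem.List.pyGet? mx 0).getD "") - j) (by omega) acc

theorem pvNodupFold {α : Type} (L : List α) (F : PySem.Dict String Int → α → PySem.Dict String Int)
    (h : ∀ d x, d.keys.Nodup → (F d x).keys.Nodup) (d : PySem.Dict String Int)
    (hd : d.keys.Nodup) : (L.foldl F d).keys.Nodup := by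
  induction L generalizing d with
  | nil => simpa using hd
  | cons x t ih => exact ih _ (h d x hd)

theorem pvTally_nodup (words : PySem.Set String) (K : Int) (diags : List String) :
    (pvTally words K diags).keys.Nodup := by
  unfold pvTally
  apply pvNodupFold _ _ ?_ _ PySem.Dict.nodup_keys_empty
  intro d x hd
  dsimp only
  apply pvNodupFold _ _ ?_ _ hd
  intro d1 a hd1
  apply pvNodupFold _ _ ?_ _ hd1
  intro d2 l hd2
  dsimp only
  split
  · exact PySem.Dict.nodup_keys_insert _ _ _ hd2
  · exact hd2

theorem pvInner2L (L : List (String × Int)) (hnd : (L.map Prod.fst).Nodup) (x : String) (v : Int)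
    (r : PySem.Dict String Int) :
    L.foldl (fun r kl => if x == kl.1 then r.insert x (v + kl.2) else r) r
      = if (PySem.Dict.mk L).contains x then r.insert x (v + (PySem.Dict.mk L).getD x 0) else r := by
  induction L generalizing r with
  | nil => simp [PySem.Dict.contains_mk]
  | cons p t ih =>
    obtain ⟨pk, pv⟩ := p
    have hnd' : (t.map Prod.fst).Nodup := (List.nodup_cons.mp hnd).2
    have hpt : pk ∉ t.map Prod.fst := by simpa using (List.nodup_cons.mp hnd).1
    simp only [List.foldl_cons]
    by_cases hx : x = pk
    · have hbeq : (x == pk) = true := beq_iff_eq.mpr hx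
      rw [if_pos hbeq]
      have hrest : t.foldl (fun r kl => if x == kl.1 then r.insert x (v + kl.2) else r)
          (r.insert x (v + pv)) = r.insert x (v + pv) := by
        rw [PySem.List.foldl_congr_mem t _ (fun acc _ => acc) _ ?_, PySem.List.foldl_ignore]
        intro acc kl hkl
        have hne : x ≠ kl.1 := by
          intro he; exact hpt (hx ▸ he ▸ List.mem_map_of_mem hkl)
        simp [hne]
      rw [hrest]
      have hc : (PySem.Dict.mk ((pk, pv) :: t)).contains x = true := by
        simp [PySem.Dict.contains_mk, hx]
      rw [if_pos hc]
      have hg : (PySem.Dict.mk ((pk, pv) :: t)).getD x 0 = pv := by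
        simp [PySem.Dict.getD_eq_get?_getD, PySem.Dict.get?_mk_cons, hx]
      rw [hg]
    · have hbeq : (x == pk) = false := beq_eq_false_iff_ne.mpr hx
      have hbeq' : (pk == x) = false := beq_eq_false_iff_ne.mpr (Ne.symm hx)
      rw [if_neg (by simp [hbeq])]
      rw [ih hnd' r]
      have hc : (PySem.Dict.mk ((pk, pv) :: t)).contains x = (PySem.Dict.mk t).contains x := by
        simp [PySem.Dict.contains_mk, hbeq']
      have hg : (PySem.Dict.mk ((pk, pv) :: t)).getD x 0 = (PySem.Dict.mk t).getD x 0 := by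
        simp [PySem.Dict.getD_eq_get?_getD, PySem.Dict.get?_mk_cons, hbeq']
      rw [hc, hg]

theorem pvInner2 (d2 : PySem.Dict String Int) (hnd : d2.keys.Nodup) (x : String) (v : Int)
    (r : PySem.Dict String Int) :
    d2.items.foldl (fun r kl => if x == kl.1 then r.insert x (v + kl.2) else r) r
      = if d2.contains x then r.insert x (v + d2.getD x 0) else r := by
  obtain ⟨L⟩ := d2
  exact pvInner2L L hnd x v r

theorem pvContainsFold1 (L : List (String × Int)) (P : PySem.Dict String Int → (String × Int) → Bool)
    (g : PySem.Dict String Int → (String × Int) → Int) (r : PySem.Dict String Int) (k : String)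
    (h : (L.foldl (fun r kv => if P r kv then r.insert kv.1 (g r kv) else r) r).contains k = true) :
    r.contains k = true ∨ k ∈ L.map Prod.fst := by
  induction L generalizing r with
  | nil => exact Or.inl (by simpa using h)
  | cons p t ih =>
    simp only [List.foldl_cons] at h
    rcases ih _ h with h' | h'
    · by_cases hP : P r p
      · rw [if_pos hP, PySem.Dict.contains_insert] at h'
        rcases Bool.or_eq_true_iff.mp h' with h'' | h''
        · exact Or.inr (by simp [eq_of_beq h''])
        · exact Or.inl h''
      · rw [if_neg hP] at h'
        exact Or.inl h'
    · exact Or.inr (by simp [h'])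

theorem pvContainsFold2 (L : List (String × Int)) (r : PySem.Dict String Int) (k : String) :
    (L.foldl (fun r kv => if r.contains kv.1 then r else r.insert kv.1 kv.2) r).contains k
      = (r.contains k || (L.map Prod.fst).contains k) := by
  induction L generalizing r with
  | nil => simp
  | cons p t ih =>
    simp only [List.foldl_cons]
    rw [ih]
    by_cases hk : k = p.1
    · have hbeq : (k == p.1) = true := beq_iff_eq.mpr hk
      by_cases hc : r.contains p.1
      · simp [hc, hk]
      · simp [hc, hk]
    · have hbeq : (k == p.1) = false := beq_eq_false_iff_ne.mpr hk
      by_cases hc : r.contains p.1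
      · simp [hc, hbeq]
      · simp [hc, PySem.Dict.contains_insert, hbeq]

theorem pvThird (L : List (String × Int)) (hL : (L.map Prod.fst).Nodup)
    (c1 r : PySem.Dict String Int) (h : ∀ p ∈ L, r.contains p.1 = c1.contains p.1) :
    L.foldl (fun r kv => if r.contains kv.1 then r else r.insert kv.1 kv.2) r
      = L.foldl (fun out wv => if c1.contains wv.1 then out else out.insert wv.1 wv.2) r := by
  induction L generalizing r with
  | nil => rfl
  | cons p t ih =>
    simp only [List.foldl_cons]
    rw [h p (List.mem_cons_self)]
    by_cases hc : c1.contains p.1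
    · rw [if_pos hc]
      exact ih (List.nodup_cons.mp hL).2 r (fun q hq => h q (List.mem_cons_of_mem _ hq))
    · rw [if_neg hc]
      refine ih (List.nodup_cons.mp hL).2 _ (fun q hq => ?_)
      rw [PySem.Dict.contains_insert]
      have hne : q.1 ≠ p.1 := by
        intro he
        exact (List.nodup_cons.mp hL).1 (he ▸ List.mem_map_of_mem hq)
      simp [hne, h q (List.mem_cons_of_mem _ hq)]

-- A's quadratic sum_result equals B's three linear merge passes
theorem pvMerge (c1 c2 : PySem.Dict String Int) (h2 : c2.keys.Nodup) :
    sum_result c1 c2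
      = c2.items.foldl (fun out wv => if c1.contains wv.1 then out else out.insert wv.1 wv.2)
          (c1.items.foldl (fun out wv => if out.contains wv.1 then out else out.insert wv.1 wv.2)
            (c1.items.foldl (fun out wv =>
              if c2.contains wv.1 then out.insert wv.1 (wv.2 + c2.getD wv.1 0) else out) PySem.Dict.empty)) := by
  unfold sum_result
  have hfirst : c1.items.foldl (fun result kv => c2.items.foldl (fun result kl =>
        if kv.1 == kl.1 then result.insert kv.1 (kv.2 + kl.2) else result) result) PySem.Dict.empty
      = c1.items.foldl (fun out wv =>
        if c2.contains wv.1 then out.insert wv.1 (wv.2 + c2.getD wv.1 0) else out) PySem.Dict.empty :=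
    PySem.List.foldl_congr_mem _ _ _ _ (fun acc kv _ => pvInner2 c2 h2 kv.1 kv.2 acc)
  rw [hfirst]
  apply pvThird c2.items h2 c1 _
  intro p hp
  rw [pvContainsFold2]
  by_cases hm : c1.contains p.1
  · have hk : (c1.items.map Prod.fst).contains p.1 = true := by
      have hmem : p.1 ∈ c1.items.map Prod.fst := (PySem.Dict.contains_iff_mem_keys _ _).mp hm
      simpa using hmem
    rw [hm, hk]
    simp
  · have hnotk : p.1 ∉ c1.items.map Prod.fst := by
      intro hmem
      exact hm ((PySem.Dict.contains_iff_mem_keys _ _).mpr hmem)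
    have h1f : (c1.items.foldl (fun out wv =>
        if c2.contains wv.1 then out.insert wv.1 (wv.2 + c2.getD wv.1 0) else out) PySem.Dict.empty).contains p.1 = false := by
      by_contra hc
      rcases pvContainsFold1 c1.items (fun _ kv => c2.contains kv.1)
        (fun _ kv => kv.2 + c2.getD kv.1 0) PySem.Dict.empty p.1 (by simpa using hc) with h' | h'
      · simp at h'
      · exact hnotk h'
    simp [h1f, hm, hnotk]

-- ===== VERDICT (by name: the statement is the Claim_ definition above) =====
theorem check_wxyz_spec : Claim_equal_check_wxyz := by
  unfold Claim_equal_check_wxyz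
  intro wl mx _hdom _hpre
  unfold Spec_check_wxyz
  simp only [check_wxyz, check_wxyz_alt]
  rw [pvTop1 wl mx, pvTop2 wl mx, pvMerge _ _ (pvTally_nodup _ _ _)]
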